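-- pv_equiv track=rewrite | github.com/caiopo/INE5409 | Old/T1/gauss_seidel.py | converges
-- ===== SOURCE A (Python) =====
-- def converges(A):
--     d = False
--
--     for i in range(len(A)):
--
--         s = sum(A[i][:i]) + sum(A[i][i + 1:len(A)])
--
--         if A[i][i] < s:
--             return False
--
--         if A[i][i] > s:
--             d = True
--
--     return d
-- ===== SOURCE B (Python) =====
-- def converges(A):
--     n = len(A)
--
--     def strict(i):
--         # None: a non-dominant row found; else whether a strictly dominant row exists at/after i
--         if i == n:
--             return False
--         m = A[i][i] - sum(A[i][:i]) - sum(A[i][i + 1:n])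
--         if m < 0:
--             return None
--         rest = strict(i + 1)
--         if rest is None:
--             return None
--         return m > 0 or rest
--
--     r = strict(0)
--     return False if r is None else r
-- ===== Notes on version B (the rewrite author's own statement) =====
-- stated objective: alternative
-- what changed: A's fused iterative loop with an early return and a mutable strict-dominance flag is replaced by a recursive decomposition: a helper on the row index returns None on the first non-dominant row and otherwise whether a strictly dominant row exists in the suffix, combined on the way back up.
import Mathlib
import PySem

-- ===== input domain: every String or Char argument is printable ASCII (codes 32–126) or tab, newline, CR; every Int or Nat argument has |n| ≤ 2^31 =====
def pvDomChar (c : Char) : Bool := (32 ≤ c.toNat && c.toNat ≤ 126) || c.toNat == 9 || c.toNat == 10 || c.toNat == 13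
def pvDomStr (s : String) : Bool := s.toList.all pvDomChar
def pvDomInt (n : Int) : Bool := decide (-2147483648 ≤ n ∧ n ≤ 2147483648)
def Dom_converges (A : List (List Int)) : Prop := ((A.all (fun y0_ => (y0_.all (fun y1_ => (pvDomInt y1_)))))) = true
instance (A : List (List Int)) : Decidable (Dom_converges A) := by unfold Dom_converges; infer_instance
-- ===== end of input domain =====

-- B replaces A's fused loop (early return + mutable flag) by a recursive helper returning
-- Option Bool: none on a non-dominant row, else whether a strictly dominant row follows.

-- ===== PORT A =====
-- A's for-loop with early return: recursion over the index list, carrying the flag d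
def convergesGo (A : List (List Int)) : List Int → Bool → Bool
  | [], d => d
  | i :: rest, d =>
    let row := PySem.List.pyGetD A i []
    let s := (PySem.List.slice row none (some i)).sum
             + (PySem.List.slice row (some (i + 1)) (some (A.length : Int))).sum
    if PySem.List.pyGetD row i 0 < s then false
    else convergesGo A rest (if PySem.List.pyGetD row i 0 > s then true else d)

def converges (A : List (List Int)) : Bool :=
  convergesGo A (PySem.List.pyRange 0 A.length 1) false

-- ===== PORT B =====
-- B's recursive helper strict(i); the 'A.length ≤ i' guard is Python's 'i == n' test made
-- total (strict is only ever called with i ≤ n)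
def strictGo (A : List (List Int)) (i : Nat) : Option Bool :=
  if A.length ≤ i then some false
  else
    let row := PySem.List.pyGetD A (i : Int) []
    let m := PySem.List.pyGetD row (i : Int) 0
             - (PySem.List.slice row none (some (i : Int))).sum
             - (PySem.List.slice row (some ((i : Int) + 1)) (some (A.length : Int))).sum
    if m < 0 then none
    else match strictGo A (i + 1) with
      | none => none
      | some rest => some (decide (m > 0) || rest)
termination_by A.length - i

def converges_alt (A : List (List Int)) : Bool :=
  match strictGo A 0 with
  | none => false
  | some r => r

-- ===== PRECONDITION & SPEC =====
-- Pre_ excludes exactly the inputs on which Python A (and Python B alike, with the same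
-- reads) raises IndexError: a row k too short to hold its diagonal entry A[k][k] that is
-- not preceded by a strictly non-dominant row (on which both already returned False).
def Pre_converges (A : List (List Int)) : Prop :=
  ∀ k < A.length, (A.getD k []).length ≤ k →
    ∃ j < k, j < (A.getD j []).length ∧
      2 * (A.getD j []).getD j 0 < ((A.getD j []).take A.length).sum
instance (A : List (List Int)) : Decidable (Pre_converges A) := by
  unfold Pre_converges; infer_instance

def pvWitness_converges : List (List Int) := [[4, 1], [1, 3]]

def Spec_converges (A : List (List Int)) (out : Bool) : Prop := out = converges_alt A
instance (A : List (List Int)) (out : Bool) : Decidable (Spec_converges A out) := by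
  unfold Spec_converges; infer_instance

-- ===== CLAIM =====
def Claim_equal_converges : Prop :=
  ∀ (A : List (List Int)), Dom_converges A → Pre_converges A → Spec_converges A (converges A)

-- ===== LEMMAS AND PROOFS =====
-- A's fused loop from index i equals B's recursive helper from i, for any carried flag d
theorem loop_eq (A : List (List Int)) : ∀ (k i : Nat) (d : Bool), A.length ≤ i + k →
    convergesGo A (PySem.List.pyRange (i : Int) (A.length : Int) 1) d =
      (match strictGo A i with
       | none => false
       | some r => r || d) := by
  intro k
  induction k with
  | zero =>
    intro i d h
    rw [PySem.List.pyRange_one_eq_nil (by exact_mod_cast h), strictGo, if_pos (show A.length ≤ i by omega)]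
    simp [convergesGo]
  | succ k ih =>
    intro i d h
    by_cases hi : i < A.length
    · rw [PySem.List.pyRange_one_cons (by exact_mod_cast hi),
        strictGo, if_neg (by omega)]
      have hcast : ((i : Int) + 1) = (((i + 1 : Nat)) : Int) := by push_cast; ring
      have ih' := fun d => ih (i + 1) d (by omega)
      simp only [convergesGo]
      rw [hcast]
      set g := PySem.List.pyGetD (PySem.List.pyGetD A (i : Int) []) (i : Int) 0 with hg
      set s1 := (PySem.List.slice (PySem.List.pyGetD A (i : Int) []) none (some (i : Int))).sum
      set s2 := (PySem.List.slice (PySem.List.pyGetD A (i : Int) [])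
                  (some (((i + 1 : Nat) : Int))) (some (A.length : Int))).sum
      by_cases hneg : g < s1 + s2
      · rw [if_pos hneg, if_pos (by omega : g - s1 - s2 < 0)]
      · rw [if_neg hneg, if_neg (by omega : ¬ g - s1 - s2 < 0)]
        by_cases hpos : g > s1 + s2
        · have hp : decide (g - s1 - s2 > 0) = true := by
            simp only [decide_eq_true_eq]; omega
          rw [if_pos hpos, ih' true, hp]
          cases strictGo A (i + 1) with
          | none => rfl
          | some r => simp
        · have hp : decide (g - s1 - s2 > 0) = false := by
            simp only [decide_eq_false_iff_not]; omega
          rw [if_neg hpos, ih' d, hp]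
          cases strictGo A (i + 1) with
          | none => rfl
          | some r => simp
    · rw [PySem.List.pyRange_one_eq_nil (by exact_mod_cast (by omega : A.length ≤ i)),
        strictGo, if_pos (by omega)]
      simp [convergesGo]

-- ===== VERDICT =====
theorem converges_spec : Claim_equal_converges := by
  intro A _ _
  unfold Spec_converges converges converges_alt
  have := loop_eq A A.length 0 false (by omega)
  simp only [Bool.or_false] at this
  simpa using this
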